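-- pv_equiv track=rewrite | github.com/OleksandrKolko/programming_1course | kolko_7_10.py | convert_to_10
-- ===== SOURCE A (Python) =====
-- def convert_to_10(m, num):
--     i = 0
--     convert_num = 0
--     while num > 0:
--         convert_num += (num % 10) * (m ** i)
--         num //= 10
--         i += 1
--     return convert_num
-- ===== SOURCE B (Python) =====
-- def convert_to_10(m, num):
--     digits = []
--     while num > 0:
--         digits.append(num % 10)
--         num //= 10
--     result = 0
--     for d in reversed(digits):
--         result = result * m + d
--     return result
-- ===== Notes on version B (the rewrite author's own statement) =====
-- stated objective: alternative
-- what changed: B extracts the decimal digits into a list first and then evaluates by Horner's method over the reversed list (running accumulator result = result*m + d), never computing a power m**i.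
import Mathlib
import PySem

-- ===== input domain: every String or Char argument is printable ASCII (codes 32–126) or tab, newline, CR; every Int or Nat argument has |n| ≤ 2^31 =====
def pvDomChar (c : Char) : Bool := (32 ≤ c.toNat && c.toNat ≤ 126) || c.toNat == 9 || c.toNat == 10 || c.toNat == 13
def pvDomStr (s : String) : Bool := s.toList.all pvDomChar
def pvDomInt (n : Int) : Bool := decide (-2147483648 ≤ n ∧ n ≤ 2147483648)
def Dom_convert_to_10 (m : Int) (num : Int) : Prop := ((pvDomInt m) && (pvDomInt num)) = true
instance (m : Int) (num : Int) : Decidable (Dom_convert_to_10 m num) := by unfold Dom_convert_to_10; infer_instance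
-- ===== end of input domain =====

-- B replaces A's per-digit power m ** i with a digit-list extraction followed by a Horner
-- evaluation over the reversed list (objective: alternative decomposition, no powers).

-- ===== PORT A =====
-- termination helper for the while-loops: num // 10 shrinks while num > 0
theorem pv_div10_lt (num : Int) (h : num > 0) :
    (PySem.Int.floordiv num 10).toNat < num.toNat := by
  rw [PySem.Int.floordiv_eq_ediv_of_pos (by norm_num)]
  omega

def convert_to_10_loop (m num : Int) (i : Nat) (convert_num : Int) : Int :=
  if h : num > 0 then
    convert_to_10_loop m (PySem.Int.floordiv num 10) (i + 1)
      (convert_num + (PySem.Int.mod num 10) * m ^ i)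
  else convert_num
termination_by num.toNat
decreasing_by exact pv_div10_lt num h

def convert_to_10 (m : Int) (num : Int) : Int :=
  convert_to_10_loop m num 0 0

-- ===== PORT B =====
-- digit extraction: the same `while num > 0` loop of Source B, building the digit list
def pvDigits (num : Int) : List Int :=
  if h : num > 0 then
    PySem.Int.mod num 10 :: pvDigits (PySem.Int.floordiv num 10)
  else []
termination_by num.toNat
decreasing_by exact pv_div10_lt num h

def convert_to_10_alt (m : Int) (num : Int) : Int :=
  (pvDigits num).reverse.foldl (fun result d => result * m + d) 0

-- ===== PRECONDITION & SPEC =====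
def Spec_convert_to_10 (m : Int) (num : Int) (out : Int) : Prop := out = convert_to_10_alt m num
instance (m : Int) (num : Int) (out : Int) : Decidable (Spec_convert_to_10 m num out) := by unfold Spec_convert_to_10; infer_instance

-- ===== CLAIM (what is proved, stated in full; the proofs are below) =====
def Claim_equal_convert_to_10 : Prop := ∀ (m : Int) (num : Int), Dom_convert_to_10 m num → Spec_convert_to_10 m num (convert_to_10 m num)

-- ===== LEMMAS AND PROOFS =====

-- little-endian polynomial evaluation: the common value of both programs
def pvPoly (m : Int) : List Int → Int
  | [] => 0
  | d :: ds => d + m * pvPoly m ds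

theorem loopA_eq_poly (m num : Int) (i : Nat) (acc : Int) :
    convert_to_10_loop m num i acc = acc + m ^ i * pvPoly m (pvDigits num) := by
  by_cases h : num > 0
  · rw [convert_to_10_loop, pvDigits, dif_pos h, dif_pos h,
      loopA_eq_poly m (PySem.Int.floordiv num 10) (i + 1)]
    simp [pvPoly]; ring
  · rw [convert_to_10_loop, pvDigits, dif_neg h, dif_neg h]
    simp [pvPoly]
termination_by num.toNat
decreasing_by exact pv_div10_lt num h

theorem horner_reverse (m acc : Int) (ds : List Int) :
    ds.reverse.foldl (fun result d => result * m + d) acc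
      = acc * m ^ ds.length + pvPoly m ds := by
  induction ds generalizing acc with
  | nil => simp [pvPoly]
  | cons d ds ih =>
      simp only [List.reverse_cons, List.foldl_append, List.foldl_cons, List.foldl_nil, ih,
        pvPoly, List.length_cons]
      ring

-- ===== VERDICT (by name: the statement is the Claim_ definition above) =====
theorem convert_to_10_spec : Claim_equal_convert_to_10 := by
  intro m num _
  unfold Spec_convert_to_10 convert_to_10 convert_to_10_alt
  rw [loopA_eq_poly, horner_reverse]
  ring
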